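-- pv_equiv track=rewrite | github.com/DINGIRABZU/ABZU | release.py | _chakra_changed
-- ===== SOURCE A (Python) =====
-- def _chakra_changed(changed: list[str], paths: list[str]) -> bool:
--     """Return ``True`` if any ``paths`` appear in ``changed`` files."""
--     for p in paths:
--         if p.endswith("/"):
--             if any(f.startswith(p) for f in changed):
--                 return True
--         else:
--             if p in changed:
--                 return True
--     return False
-- ===== SOURCE B (Python) =====
-- def _chakra_changed(changed: list[str], paths: list[str]) -> bool:
--     """Return ``True`` if any ``paths`` appear in ``changed`` files."""
--     targets = set(paths)
--     for f in changed:
--         if f in targets: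
--             return True
--         for i in range(len(f)):
--             if f[i] == "/" and f[: i + 1] in targets:
--                 return True
--     return False
-- ===== Notes on version B (the rewrite author's own statement) =====
-- stated objective: alternative
-- what changed: B inverts the matching direction: it puts all paths in one hash set and, for each changed file, looks up the file itself and each of the file's own '/'-boundary prefixes in that set, so no path is ever scanned against a file; A instead loops over paths and scans changed per path.
import Mathlib
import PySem

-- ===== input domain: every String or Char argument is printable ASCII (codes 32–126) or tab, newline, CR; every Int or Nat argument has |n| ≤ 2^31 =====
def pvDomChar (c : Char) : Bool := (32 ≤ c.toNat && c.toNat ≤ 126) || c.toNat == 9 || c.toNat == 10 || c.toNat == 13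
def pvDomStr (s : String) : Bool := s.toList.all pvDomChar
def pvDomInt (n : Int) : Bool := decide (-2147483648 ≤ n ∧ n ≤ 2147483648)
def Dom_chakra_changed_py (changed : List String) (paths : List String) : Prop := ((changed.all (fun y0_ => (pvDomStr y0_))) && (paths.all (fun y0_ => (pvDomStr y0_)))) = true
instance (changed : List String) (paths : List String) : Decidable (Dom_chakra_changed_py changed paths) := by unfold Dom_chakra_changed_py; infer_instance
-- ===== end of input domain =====

-- B inverts the matching direction: one hash set of all paths, then each changed file
-- looks up itself and its own '/'-boundary prefixes in that set (alternative decomposition).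

-- ===== PORT A =====
def chakra_changed_py (changed : List String) (paths : List String) : Bool :=
  match paths with
  | [] => false
  | p :: rest =>
    if PySem.Str.endswith p "/" then
      if changed.any (fun f => PySem.Str.startswith f p) then true
      else chakra_changed_py changed rest
    else
      if changed.contains p then true
      else chakra_changed_py changed rest

-- ===== PORT B =====
-- exact on all inputs: `range(len(f))` indexes the chars of f in order, `f[i]` with
-- 0 ≤ i < len(f) is `f.toList[i]?`, and the slice `f[:i+1]` with 0 ≤ i+1 ≤ len(f) is `take (i+1)`.
def chakra_changed_py_alt (changed : List String) (paths : List String) : Bool :=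
  let targets : PySem.Set String := PySem.Set.ofList paths
  changed.any (fun f =>
    PySem.Set.contains targets f ||
    (List.range f.toList.length).any (fun i =>
      (f.toList[i]? == some '/') &&
        PySem.Set.contains targets (String.ofList (f.toList.take (i + 1)))))

-- ===== PRECONDITION & SPEC =====
def Spec_chakra_changed_py (changed : List String) (paths : List String) (out : Bool) : Prop := out = chakra_changed_py_alt changed paths
instance (changed : List String) (paths : List String) (out : Bool) : Decidable (Spec_chakra_changed_py changed paths out) := by unfold Spec_chakra_changed_py; infer_instance

-- ===== CLAIM (what is proved, stated in full; the proofs are below) =====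
def Claim_equal_chakra_changed_py : Prop := ∀ (changed : List String) (paths : List String), Dom_chakra_changed_py changed paths → Spec_chakra_changed_py changed paths (chakra_changed_py changed paths)

-- ===== LEMMAS AND PROOFS =====

-- characterisation of A's result
theorem chakra_changed_py_iff (changed paths : List String) :
    chakra_changed_py changed paths = true ↔
      ∃ p ∈ paths,
        if PySem.Str.endswith p "/" = true then
          ∃ f ∈ changed, PySem.Str.startswith f p = true
        else p ∈ changed := by
  induction paths with
  | nil => simp [chakra_changed_py]
  | cons p rest ih =>
    simp only [chakra_changed_py, List.mem_cons, exists_eq_or_imp]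
    by_cases h : PySem.Str.endswith p "/" = true
    · rw [if_pos h, if_pos h]
      by_cases ha : (changed.any fun f => PySem.Str.startswith f p) = true
      · rw [if_pos ha]
        rw [List.any_eq_true] at ha
        exact iff_of_true rfl (Or.inl ha)
      · rw [if_neg ha, ih]
        constructor
        · exact Or.inr
        · rintro (hf | hx)
          · exact absurd (List.any_eq_true.mpr hf) ha
          · exact hx
    · rw [if_neg h, if_neg h]
      by_cases hc : changed.contains p = true
      · rw [if_pos hc]
        exact iff_of_true rfl (Or.inl (by simpa using hc))
      · rw [if_neg hc, ih]
        constructor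
        · exact Or.inr
        · rintro (hf | hx)
          · exact absurd (by simpa using hf : changed.contains p = true) hc
          · exact hx

-- characterisation of B's result
theorem chakra_changed_py_alt_iff (changed paths : List String) :
    chakra_changed_py_alt changed paths = true ↔
      ∃ f ∈ changed, f ∈ paths ∨
        ∃ i < f.toList.length, f.toList[i]? = some '/' ∧
          String.ofList (f.toList.take (i + 1)) ∈ paths := by
  simp only [chakra_changed_py_alt, List.any_eq_true, Bool.or_eq_true, Bool.and_eq_true,
    PySem.Set.contains_iff, PySem.Set.mem_ofList, List.mem_range, beq_iff_eq]

-- startswith on strings, as a list prefix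
theorem startswith_iff_prefix (f p : String) :
    PySem.Str.startswith f p = true ↔ p.toList <+: f.toList := by
  rw [PySem.Str.startswith_eq, PySem.Chars.startswith_iff]

-- endswith "/" on strings, as a list suffix
theorem endswith_slash_iff (p : String) :
    PySem.Str.endswith p "/" = true ↔ ['/'] <:+ p.toList := by
  rw [PySem.Str.endswith_eq, PySem.Chars.endswith_iff]
  rfl

-- the two characterisations describe the same matches
theorem chakra_match_equiv (changed paths : List String) :
    (∃ p ∈ paths,
        if PySem.Str.endswith p "/" = true then
          ∃ f ∈ changed, PySem.Str.startswith f p = true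
        else p ∈ changed) ↔
      (∃ f ∈ changed, f ∈ paths ∨
        ∃ i < f.toList.length, f.toList[i]? = some '/' ∧
          String.ofList (f.toList.take (i + 1)) ∈ paths) := by
  constructor
  · rintro ⟨p, hp, hcond⟩
    by_cases he : PySem.Str.endswith p "/" = true
    · rw [if_pos he] at hcond
      obtain ⟨f, hf, hs⟩ := hcond
      rw [startswith_iff_prefix] at hs
      rw [endswith_slash_iff] at he
      obtain ⟨q, hq⟩ := he
      -- p.toList = q ++ ['/'], a prefix of f.toList; the '/' sits at index q.length
      obtain ⟨r, hr⟩ := hs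
      refine ⟨f, hf, Or.inr ⟨q.length, ?_, ?_, ?_⟩⟩
      · have hlen : (q ++ ['/']).length + r.length = f.toList.length := by
          rw [hq, ← List.length_append, hr]
        simp only [List.length_append, List.length_cons, List.length_nil] at hlen
        omega
      · rw [← hr, ← hq]
        simp
      · have htake : f.toList.take (q.length + 1) = p.toList := by
          rw [← hr, ← hq]
          have hl : q.length + 1 = (q ++ ['/']).length := by simp
          rw [hl, List.take_left]
        rw [htake]
        simpa using hp
    · rw [if_neg he] at hcond
      exact ⟨p, hcond, Or.inl hp⟩
  · rintro ⟨f, hf, h | ⟨i, hi, hc, hm⟩⟩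
    · refine ⟨f, h, ?_⟩
      by_cases he : PySem.Str.endswith f "/" = true
      · rw [if_pos he]
        exact ⟨f, hf, (startswith_iff_prefix f f).mpr List.prefix_rfl⟩
      · rw [if_neg he]; exact hf
    · refine ⟨String.ofList (f.toList.take (i + 1)), hm, ?_⟩
      have he : PySem.Str.endswith (String.ofList (f.toList.take (i + 1))) "/" = true := by
        rw [endswith_slash_iff]
        simp only [String.toList_ofList]
        rw [List.take_add_one, hc]
        exact ⟨f.toList.take i, rfl⟩
      rw [if_pos he]
      refine ⟨f, hf, ?_⟩
      rw [startswith_iff_prefix]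
      simpa using List.take_prefix (i + 1) f.toList
  
-- ===== VERDICT (by name: the statement is the Claim_ definition above) =====
theorem chakra_changed_py_spec : Claim_equal_chakra_changed_py := by
  intro changed paths _
  unfold Spec_chakra_changed_py
  rw [Bool.eq_iff_iff, chakra_changed_py_iff, chakra_changed_py_alt_iff]
  exact chakra_match_equiv changed paths
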